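-- pv_equiv track=rewrite | github.com/Namdrib/adventofcode | src/main/_2023/day14.py | roll_rock_left
-- ===== SOURCE A (Python) =====
-- def roll_rock_left(grid: list, x: int, y: int) -> int:
--     """
--     Calculate the new x position of a rock rolling left
--
--     :param grid: The layout of the rocks
--     :type grid: list
--     :param x: The x co-ordinate of the rock to roll
--     :type x: int
--     :param y: The y co-ordinate of the rock to roll
--     :type y: int
--     :return: The x position of the rock after moving
--     :rtype: int
--     """
--     ret: int = x
--
--     # See how far left we can roll the rock at grid[y][x]
--     for new_x in range(x-1, -1, -1):
--         potential_grid_position: str = grid[y][new_x]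
--         if potential_grid_position == '.':
--             if new_x <= 0:
--                 ret = 0
--                 break
--             ret = new_x
--         else:
--             break
--
--     return ret
-- ===== SOURCE B (Python) =====
-- def roll_rock_left(grid: list, x: int, y: int) -> int:
--     # Nothing to the left of column 0 (or of a non-positive column): the rock stays.
--     if x <= 0:
--         return x
--     # The rock lands just after the last non-'.' cell in the prefix before x.
--     return len(grid[y][:x].rstrip('.'))
-- ===== Notes on version B (the rewrite author's own statement) =====
-- stated objective: simpler
-- what changed: Replaces the explicit right-to-left scan-and-track loop with a closed-form string computation: the landing position is the length of the row prefix before x with trailing '.' stripped.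
import Mathlib
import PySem

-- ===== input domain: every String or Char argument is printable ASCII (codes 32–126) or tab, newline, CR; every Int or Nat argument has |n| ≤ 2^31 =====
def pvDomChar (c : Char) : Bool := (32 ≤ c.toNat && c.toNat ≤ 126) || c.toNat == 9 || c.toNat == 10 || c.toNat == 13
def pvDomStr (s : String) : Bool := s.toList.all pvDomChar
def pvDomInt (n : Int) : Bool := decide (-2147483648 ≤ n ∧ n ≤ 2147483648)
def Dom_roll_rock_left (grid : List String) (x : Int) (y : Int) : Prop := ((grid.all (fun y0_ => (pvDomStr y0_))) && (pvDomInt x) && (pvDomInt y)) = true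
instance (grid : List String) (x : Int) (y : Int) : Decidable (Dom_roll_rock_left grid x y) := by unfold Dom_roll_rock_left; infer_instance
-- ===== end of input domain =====

-- B replaces A's explicit right-to-left scan-and-track loop by a closed-form string
-- computation (length of the prefix before x with trailing '.' stripped); objective: simpler.


-- ===== PORT A =====
-- the 'for new_x in range(x-1, -1, -1)' loop with its breaks; 'none' from pyGet? is a
-- Python IndexError (excluded by Pre_), the returned value there is irrelevant
def rollA_loop (grid : List String) (y : Int) (idxs : List Int) (ret : Int) : Int :=
  match idxs with
  | [] => ret
  | i :: rest =>
    match PySem.List.pyGet? grid y with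
    | none => ret          -- grid[y] raises IndexError (outside Pre_)
    | some row =>
      match PySem.List.pyGet? row.toList i with
      | none => ret        -- grid[y][new_x] raises IndexError (outside Pre_)
      | some c =>
        if c = '.' then
          if i ≤ 0 then 0
          else rollA_loop grid y rest i
        else ret

def roll_rock_left (grid : List String) (x : Int) (y : Int) : Int :=
  rollA_loop grid y (PySem.List.pyRange (x - 1) (-1) (-1)) x

-- ===== PORT B =====
-- hand-port of str.rstrip('.') (PySem has no rstrip-with-argument): drop the trailing
-- '.' characters; exact on every string
def rstripDots (cs : List Char) : List Char :=
  (cs.reverse.dropWhile (· == '.')).reverse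

def roll_rock_left_alt (grid : List String) (x : Int) (y : Int) : Int :=
  if x ≤ 0 then x
  else
    match PySem.List.pyGet? grid y with
    | none => 0            -- grid[y] raises IndexError in B too (outside Pre_)
    | some row =>
      ((rstripDots (PySem.List.slice row.toList none (some x))).length : Int)

-- ===== PRECONDITION & SPEC =====
-- Pre_ excludes exactly the inputs on which A raises IndexError: x ≥ 1 with y out of
-- range for grid, or x beyond the length of row grid[y] (the loop's first access fails).
def Pre_roll_rock_left (grid : List String) (x : Int) (y : Int) : Prop :=
  x ≤ 0 ∨ (-(grid.length : Int) ≤ y ∧ y < (grid.length : Int) ∧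
           x ≤ ((PySem.List.pyGetD grid y "").toList.length : Int))
instance (grid : List String) (x : Int) (y : Int) : Decidable (Pre_roll_rock_left grid x y) := by unfold Pre_roll_rock_left; infer_instance

def pvWitness_roll_rock_left : List String × Int × Int := (["#..O."], 3, 0)

def Spec_roll_rock_left (grid : List String) (x : Int) (y : Int) (out : Int) : Prop := out = roll_rock_left_alt grid x y
instance (grid : List String) (x : Int) (y : Int) (out : Int) : Decidable (Spec_roll_rock_left grid x y out) := by unfold Spec_roll_rock_left; infer_instance

-- ===== CLAIM (what is proved, stated in full; the proofs are below) =====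
def Claim_equal_roll_rock_left : Prop := ∀ (grid : List String) (x : Int) (y : Int), Dom_roll_rock_left grid x y → Pre_roll_rock_left grid x y → Spec_roll_rock_left grid x y (roll_rock_left grid x y)

-- ===== LEMMAS AND PROOFS =====

-- A's loop started at column n computes the length of (row.take n) with trailing '.' removed
lemma loopA_eq (grid : List String) (y : Int) (s : String)
    (hget : PySem.List.pyGet? grid y = some s) :
    ∀ n : Nat, n ≤ s.toList.length →
      rollA_loop grid y (PySem.List.pyRange ((n : Int) - 1) (-1) (-1)) (n : Int)
        = (((s.toList.take n).reverse.dropWhile (· == '.')).length : Int) := by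
  intro n
  induction n with
  | zero =>
    intro _
    rw [PySem.List.pyRange_neg_one_eq_nil (by omega)]
    simp [rollA_loop]
  | succ n ih =>
    intro h
    have hn : n < s.toList.length := by omega
    have hstep : ((n + 1 : Nat) : Int) - 1 = (n : Int) := by push_cast; ring
    rw [hstep, PySem.List.pyRange_neg_one_cons (by omega)]
    have hidx : PySem.List.pyGet? s.toList ((n : Nat) : Int) = some s.toList[n] := by
      simp [PySem.List.pyGet?_natCast, List.getElem?_eq_getElem hn]
    have htake : s.toList.take (n + 1) = s.toList.take n ++ [s.toList[n]] := by
      rw [List.take_add_one, List.getElem?_eq_getElem hn]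
      rfl
    by_cases hc : s.toList[n] = '.'
    · by_cases h0 : n = 0
      · subst h0
        have hidx0 : PySem.List.pyGet? s.toList 0 = some s.toList[0] := by
          exact_mod_cast hidx
        simp [rollA_loop, hget, hidx0, hc, htake]
      · have : ¬ ((n : Int) ≤ 0) := by omega
        simp only [rollA_loop, hget, hidx, if_pos hc, if_neg this]
        rw [ih (by omega), htake]
        simp [hc]
    · simp only [rollA_loop, hget, hidx, if_neg hc]
      rw [htake, List.reverse_append]
      simp [hc]
      simpa using Nat.le_of_lt hn

-- ===== VERDICT (by name: the statement is the Claim_ definition above) =====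
theorem roll_rock_left_spec : Claim_equal_roll_rock_left := by
  intro grid x y _ hpre
  unfold Spec_roll_rock_left roll_rock_left roll_rock_left_alt
  by_cases hx : x ≤ 0
  · rw [PySem.List.pyRange_neg_one_eq_nil (by omega)]
    simp [rollA_loop, hx]
  · rcases hpre with hle | ⟨h1, h2, h3⟩
    · omega
    · have hrange : PySem.Raise.InRange grid.length y := by
        simp [PySem.Raise.InRange]; omega
      obtain ⟨s, hs⟩ : ∃ s, PySem.List.pyGet? grid y = some s := by
        cases hg : PySem.List.pyGet? grid y with
        | none => exact absurd hrange ((PySem.List.pyGet?_eq_none_iff _ _).mp hg)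
        | some s => exact ⟨s, rfl⟩
      have hsd : PySem.List.pyGetD grid y "" = s := by
        simp [PySem.List.pyGetD, hs]
      rw [hsd] at h3
      have hxn : x = ((x.toNat : Nat) : Int) := by omega
      rw [if_neg hx, hs]
      show rollA_loop grid y (PySem.List.pyRange (x - 1) (-1) (-1)) x
          = ((rstripDots (PySem.List.slice s.toList none (some x))).length : Int)
      rw [PySem.List.slice_to s.toList (show (0:Int) ≤ x by omega), hxn,
          loopA_eq grid y s hs x.toNat (by omega)]
      simp [rstripDots]
      have hm : max x 0 = x := by omega
      rw [hm]
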